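-- pv_equiv track=rewrite | github.com/Theeyecode/python_alg | Easy/competition.py | competitionwon
-- ===== SOURCE A (Python) =====
-- HOME_TEAM_WON = 1
--
-- def competitionwon(competitions, results):
--
--     currentBestTeam = ""
--     scores = {currentBestTeam: 0}
--
--     for idx, competition in enumerate(competitions):
--         result = results[idx]
--         homeTeam, awayTeam = competition
--
--         winningTeam = homeTeam if result == HOME_TEAM_WON else awayTeam
--
--         updateScores(winningTeam, 3, scores)
--
--         if scores[winningTeam] > scores[currentBestTeam]:
--             currentBestTeam = winningTeam
--
--     return currentBestTeam
--
-- def updateScores(team, points, scores):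
--     if team not in scores:
--         scores[team] = 0
--
--     scores[team] += points
-- ===== SOURCE B (Python) =====
-- def competitionwon(competitions, results):
--     # phase 1: total win-count per winning team
--     counts = {}
--     for (homeTeam, awayTeam), result in zip(competitions, results):
--         winner = homeTeam if result == 1 else awayTeam
--         counts[winner] = counts.get(winner, 0) + 1
--     if not counts:
--         return ""
--     best = 3 * max(counts.values())
--     # phase 2: the first team whose running score reaches the global maximum wins
--     running = {}
--     for (homeTeam, awayTeam), result in zip(competitions, results):
--         winner = homeTeam if result == 1 else awayTeam
--         running[winner] = running.get(winner, 0) + 1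
--         if 3 * running[winner] == best:
--             return winner
--     return ""
-- ===== Notes on version B (the rewrite author's own statement) =====
-- stated objective: alternative
-- what changed: A tracks the best team online in one fused loop; B makes two passes: it first totals 3*wins per team, takes the maximum, then rescans to return the first team whose running score reaches that maximum (same first-to-reach tie-breaking).
import Mathlib
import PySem

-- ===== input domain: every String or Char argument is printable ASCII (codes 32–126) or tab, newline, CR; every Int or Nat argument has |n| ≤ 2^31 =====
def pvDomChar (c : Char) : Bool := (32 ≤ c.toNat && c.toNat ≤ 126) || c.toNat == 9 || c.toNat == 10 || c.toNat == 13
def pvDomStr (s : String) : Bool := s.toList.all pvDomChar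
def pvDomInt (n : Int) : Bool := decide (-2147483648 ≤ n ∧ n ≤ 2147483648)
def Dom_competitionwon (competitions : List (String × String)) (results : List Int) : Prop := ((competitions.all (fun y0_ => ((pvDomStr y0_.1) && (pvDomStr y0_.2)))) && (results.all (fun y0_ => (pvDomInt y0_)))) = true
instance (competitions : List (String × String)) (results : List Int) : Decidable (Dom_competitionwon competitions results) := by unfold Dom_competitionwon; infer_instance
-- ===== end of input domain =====

-- B replaces A's fused online best-tracking by two phases: total win-counts first, then the
-- first team whose running score reaches the global maximum (same tie-breaking, same cost class).

-- ===== PORT A =====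
-- updateScores(team, 3, scores)
def pyUpdateScores (team : String) (points : Int) (scores : PySem.Dict String Int) : PySem.Dict String Int :=
  let scores1 := if scores.contains team then scores else scores.insert team 0  -- if team not in scores: scores[team] = 0
  scores1.insert team (scores1.getD team 0 + points)                            -- scores[team] += points (key present, so getD is exact)

-- the 'for idx, competition in enumerate(competitions)' loop, carrying idx
def competitionwonLoop (results : List Int) : Int → String → PySem.Dict String Int → List (String × String) → String
  | _, currentBestTeam, _, [] => currentBestTeam
  | idx, currentBestTeam, scores, competition :: rest =>
    let result := (PySem.List.pyGet? results idx).getD 0  -- results[idx]; none = IndexError, excluded by Pre_ (default unreachable there)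
    let homeTeam := competition.1
    let awayTeam := competition.2
    let winningTeam := if result = 1 then homeTeam else awayTeam
    let scores := pyUpdateScores winningTeam 3 scores
    let currentBestTeam := if scores.getD winningTeam 0 > scores.getD currentBestTeam 0 then winningTeam else currentBestTeam
    competitionwonLoop results (idx + 1) currentBestTeam scores rest

def competitionwon (competitions : List (String × String)) (results : List Int) : String :=
  competitionwonLoop results 0 "" (PySem.Dict.empty.insert "" 0) competitions

-- ===== PORT B =====
-- phase 1: counts[winner] = counts.get(winner, 0) + 1 over zip(competitions, results)
def altCounts (pairs : List ((String × String) × Int)) : PySem.Dict String Int :=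
  pairs.foldl (fun counts p =>
    let winner := if p.2 = 1 then p.1.1 else p.1.2
    counts.insert winner (counts.getD winner 0 + 1)) PySem.Dict.empty

-- phase 2: return the first winner whose running score equals best
def altScan (best : Int) : PySem.Dict String Int → List ((String × String) × Int) → String
  | _, [] => ""
  | running, p :: rest =>
    let winner := if p.2 = 1 then p.1.1 else p.1.2
    let running := running.insert winner (running.getD winner 0 + 1)
    if 3 * running.getD winner 0 = best then winner else altScan best running rest

def competitionwon_alt (competitions : List (String × String)) (results : List Int) : String :=
  let pairs := competitions.zip results
  let counts := altCounts pairs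
  if counts.items = [] then ""
  else
    let best := 3 * ((PySem.List.max? counts.values id).getD 0)  -- max(counts.values()); counts nonempty so max? is some
    altScan best PySem.Dict.empty pairs

-- ===== PRECONDITION & SPEC =====
-- Pre_ excludes exactly the inputs where A raises IndexError (fewer results than competitions).
def Pre_competitionwon (competitions : List (String × String)) (results : List Int) : Prop :=
  competitions.length ≤ results.length
instance (competitions : List (String × String)) (results : List Int) : Decidable (Pre_competitionwon competitions results) := by unfold Pre_competitionwon; infer_instance
def pvWitness_competitionwon : (List (String × String)) × List Int := ([("A", "B"), ("A", "C")], [1, 0])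

def Spec_competitionwon (competitions : List (String × String)) (results : List Int) (out : String) : Prop := out = competitionwon_alt competitions results
instance (competitions : List (String × String)) (results : List Int) (out : String) : Decidable (Spec_competitionwon competitions results out) := by unfold Spec_competitionwon; infer_instance

-- ===== CLAIM (what is proved, stated in full; the proofs are below) =====
def Claim_equal_competitionwon : Prop := ∀ (competitions : List (String × String)) (results : List Int), Dom_competitionwon competitions results → Pre_competitionwon competitions results → Spec_competitionwon competitions results (competitionwon competitions results)
-- ===== LEMMAS AND PROOFS =====

def pvWin (p : (String × String) × Int) : String := if p.2 = 1 then p.1.1 else p.1.2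

def loopZ : String → PySem.Dict String Int → List ((String × String) × Int) → String
  | b, _, [] => b
  | b, scores, p :: rest =>
    let w := pvWin p
    let scores := pyUpdateScores w 3 scores
    let b := if scores.getD w 0 > scores.getD b 0 then w else b
    loopZ b scores rest
lemma getD_pyUpdateScores (w t : String) (pts : Int) (S : PySem.Dict String Int) :
    (pyUpdateScores w pts S).getD t 0 = S.getD t 0 + (if t = w then pts else 0) := by
  unfold pyUpdateScores
  by_cases hc : S.contains w
  · simp [hc, PySem.Dict.getD_insert]
    split_ifs with h
    · subst h; simp
    · simp
  · simp [hc, PySem.Dict.getD_insert]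
    split_ifs with h
    · subst h
      have h0 : S.getD t 0 = 0 := PySem.Dict.getD_of_not_contains S 0 (by simpa using hc)
      simp [h0]
    · simp

lemma loopA_eq_loopZ : ∀ (comps : List (String × String)) (pre res : List Int) (b : String)
    (S : PySem.Dict String Int), comps.length ≤ res.length →
    competitionwonLoop (pre ++ res) (pre.length : Int) b S comps = loopZ b S (comps.zip res) := by
  intro comps
  induction comps with
  | nil => intro pre res b S h; simp [competitionwonLoop, loopZ]
  | cons c cs ih =>
    intro pre res b S h
    match res with
    | [] => simp at h
    | r :: res' =>
      simp only [competitionwonLoop, loopZ, pvWin, List.zip_cons_cons]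
      rw [PySem.List.pyGet?_append_length, Option.getD_some]
      have h1 : (pre.length : Int) + 1 = (((pre ++ [r]).length : Nat) : Int) := by simp
      have h2 : pre ++ r :: res' = (pre ++ [r]) ++ res' := by simp
      rw [h1, h2]
      exact ih (pre ++ [r]) res' _ _ (by simpa using Nat.le_of_succ_le_succ h)

lemma loopZ_stay : ∀ (ps : List ((String × String) × Int)) (seen : List String) (b : String)
    (SA : PySem.Dict String Int),
    (∀ t, SA.getD t 0 = 3 * ((seen.count t : Nat) : Int)) →
    (∀ t, (seen ++ ps.map pvWin).count t ≤ seen.count b) →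
    loopZ b SA ps = b := by
  intro ps
  induction ps with
  | nil => intro seen b SA _ _; rfl
  | cons p rest ih =>
    intro seen b SA hSA hmax
    simp only [loopZ]
    have hSA' : ∀ t, (pyUpdateScores (pvWin p) 3 SA).getD t 0 = 3 * (((seen ++ [pvWin p]).count t : Nat) : Int) := by
      intro t; rw [getD_pyUpdateScores, hSA]
      by_cases h : t = pvWin p
      · simp [h, List.count_append]; push_cast; ring
      · have : List.count t [pvWin p] = 0 := List.count_eq_zero.mpr (by simp [h])
        simp [h, List.count_append, this]
    have hle : seen.count (pvWin p) + 1 ≤ seen.count b := by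
      have := hmax (pvWin p); simp [List.count_append, List.count_cons] at this; omega
    have hbranch : ¬ ((pyUpdateScores (pvWin p) 3 SA).getD (pvWin p) 0 > (pyUpdateScores (pvWin p) 3 SA).getD b 0) := by
      rw [hSA' (pvWin p), hSA' b]
      by_cases hbw : b = pvWin p
      · subst hbw; omega
      · have e1 : (seen ++ [pvWin p]).count (pvWin p) = seen.count (pvWin p) + 1 := by simp [List.count_append]
        have e2 : (seen ++ [pvWin p]).count b = seen.count b := by
          have : List.count b [pvWin p] = 0 := List.count_eq_zero.mpr (by simp [hbw])
          simp [List.count_append, this]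
        rw [e1, e2]; push_cast; omega
    rw [if_neg hbranch]
    apply ih (seen ++ [pvWin p]) b _ hSA'
    intro t
    have h1 := hmax t
    by_cases h : t = pvWin p
    · subst h; simp [List.count_append, List.count_cons] at h1 ⊢; omega
    · have hz : List.count t [pvWin p] = 0 := List.count_eq_zero.mpr (by simp [h])
      have hz2 : List.count t (pvWin p :: List.map pvWin rest) = List.count t (List.map pvWin rest) := by
        rw [List.count_cons]; simp [Ne.symm h]
      simp [List.count_append, hz, hz2] at h1 ⊢
      omega

lemma pvCount_append_singleton (seen : List String) (w t : String) :
    (seen ++ [w]).count t = seen.count t + (if t = w then 1 else 0) := by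
  by_cases h : t = w
  · simp [h, List.count_append]
  · have : List.count t [w] = 0 := List.count_eq_zero.mpr (by simp [h])
    simp [h, List.count_append, this]

lemma loopZ_eq_altScan : ∀ (ps : List ((String × String) × Int)) (seen : List String) (b : String)
    (SA SB : PySem.Dict String Int) (M : Nat),
    (∀ t, SA.getD t 0 = 3 * ((seen.count t : Nat) : Int)) →
    (∀ t, SB.getD t 0 = ((seen.count t : Nat) : Int)) →
    (∀ t, seen.count t ≤ seen.count b) →
    seen.count b < M →
    (∀ t, (seen ++ ps.map pvWin).count t ≤ M) →
    (∃ t, (seen ++ ps.map pvWin).count t = M) →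
    loopZ b SA ps = altScan (3 * (M : Int)) SB ps := by
  intro ps
  induction ps with
  | nil =>
    intro seen b SA SB M hSA hSB hb hlt hM hex
    obtain ⟨t, ht⟩ := hex
    have := hb t
    simp at ht
    omega
  | cons p rest ih =>
    intro seen b SA SB M hSA hSB hb hlt hM hex
    simp only [loopZ, altScan]
    rw [show (if p.2 = 1 then p.1.1 else p.1.2) = pvWin p from rfl]
    have hre : seen ++ (p :: rest).map pvWin = (seen ++ [pvWin p]) ++ rest.map pvWin := by
      rw [List.map_cons, List.append_cons]
    have hSA' : ∀ t, (pyUpdateScores (pvWin p) 3 SA).getD t 0 = 3 * (((seen ++ [pvWin p]).count t : Nat) : Int) := by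
      intro t; rw [getD_pyUpdateScores, hSA, pvCount_append_singleton]
      by_cases h : t = pvWin p <;> simp [h] <;> push_cast <;> ring
    have hSB' : ∀ t, (SB.insert (pvWin p) (SB.getD (pvWin p) 0 + 1)).getD t 0 = (((seen ++ [pvWin p]).count t : Nat) : Int) := by
      intro t; rw [PySem.Dict.getD_insert, pvCount_append_singleton]
      by_cases h : t = pvWin p <;> simp [h, hSB] <;> push_cast <;> ring
    rw [hSB' (pvWin p)]
    have hMw : (seen ++ [pvWin p]).count (pvWin p) ≤ M := by
      have := hM (pvWin p); rw [hre] at this; simp [List.count_append] at this ⊢; omega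
    have hcw : (seen ++ [pvWin p]).count (pvWin p) = seen.count (pvWin p) + 1 := by
      rw [pvCount_append_singleton]; simp
    by_cases hreach : (seen ++ [pvWin p]).count (pvWin p) = M
    · have h3 : (3:Int) * (((seen ++ [pvWin p]).count (pvWin p) : Nat) : Int) = 3 * (M : Int) := by rw [hreach]
      rw [if_pos h3]
      have hbeq : (if (pyUpdateScores (pvWin p) 3 SA).getD (pvWin p) 0 > (pyUpdateScores (pvWin p) 3 SA).getD b 0 then pvWin p else b) = pvWin p := by
        by_cases hbw : b = pvWin p
        · rw [hbw]; split_ifs <;> rfl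
        · have hgt : (pyUpdateScores (pvWin p) 3 SA).getD (pvWin p) 0 > (pyUpdateScores (pvWin p) 3 SA).getD b 0 := by
            rw [hSA' (pvWin p), hSA' b]
            have e2 : (seen ++ [pvWin p]).count b = seen.count b := by
              rw [pvCount_append_singleton]; simp [hbw]
            rw [e2, hreach]
            push_cast
            omega
          rw [if_pos hgt]
      rw [hbeq]
      apply loopZ_stay rest (seen ++ [pvWin p]) (pvWin p) _ hSA'
      intro t
      have := hM t
      rw [hre] at this
      rw [hreach]
      exact this
    · have hlt3 : (seen ++ [pvWin p]).count (pvWin p) < M := by omega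
      have h3n : ¬ ((3:Int) * (((seen ++ [pvWin p]).count (pvWin p) : Nat) : Int) = 3 * (M : Int)) := by
        intro hcc; exact hreach (by omega)
      rw [if_neg h3n]
      have hcbv : (seen ++ [pvWin p]).count b = seen.count b + (if b = pvWin p then 1 else 0) :=
        pvCount_append_singleton seen (pvWin p) b
      have hcnd : ((pyUpdateScores (pvWin p) 3 SA).getD (pvWin p) 0 > (pyUpdateScores (pvWin p) 3 SA).getD b 0) ↔ (seen.count (pvWin p) + 1 > (seen ++ [pvWin p]).count b) := by
        rw [hSA' (pvWin p), hSA' b, hcw]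
        constructor <;> intro <;> omega
      have hMr : ∀ t, ((seen ++ [pvWin p]) ++ rest.map pvWin).count t ≤ M := by
        intro t; have := hM t; rw [hre] at this; exact this
      have hexr : ∃ t, ((seen ++ [pvWin p]) ++ rest.map pvWin).count t = M := by
        obtain ⟨t, ht⟩ := hex; exact ⟨t, by rw [hre] at ht; exact ht⟩
      by_cases hcond : (pyUpdateScores (pvWin p) 3 SA).getD (pvWin p) 0 > (pyUpdateScores (pvWin p) 3 SA).getD b 0
      · rw [if_pos hcond]
        have hgtc := hcnd.mp hcond
        apply ih (seen ++ [pvWin p]) (pvWin p) _ _ M hSA' hSB' _ (by rw [hcw] at hlt3 ⊢; omega) hMr hexr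
        intro t
        have h1 := hb t
        by_cases h : t = pvWin p
        · rw [h]
        · have e2 : (seen ++ [pvWin p]).count t = seen.count t := by
            rw [pvCount_append_singleton]; simp [h]
          rw [hcw, e2]
          by_cases hbw : b = pvWin p
          · rw [hbw] at h1; omega
          · have e3 : (seen ++ [pvWin p]).count b = seen.count b := by
              rw [pvCount_append_singleton]; simp [hbw]
            rw [e3] at hgtc
            omega
      · rw [if_neg hcond]
        have hlec : seen.count (pvWin p) + 1 ≤ (seen ++ [pvWin p]).count b := by
          have := (not_iff_not.mpr hcnd).mp hcond; omega
        apply ih (seen ++ [pvWin p]) b _ _ M hSA' hSB' _ _ hMr hexr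
        · intro t
          have h1 := hb t
          by_cases h : t = pvWin p
          · rw [h, hcw]; exact hlec
          · have e2 : (seen ++ [pvWin p]).count t = seen.count t := by
              rw [pvCount_append_singleton]; simp [h]
            rw [e2]
            by_cases hbw : b = pvWin p
            · rw [hbw, hcw]; rw [hbw] at h1; omega
            · have e3 : (seen ++ [pvWin p]).count b = seen.count b := by
                rw [pvCount_append_singleton]; simp [hbw]
              rw [e3]; omega
        · by_cases hbw : b = pvWin p
          · rw [hbw, hcw]; rw [hcw] at hlt3; omega
          · have e3 : (seen ++ [pvWin p]).count b = seen.count b := by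
              rw [pvCount_append_singleton]; simp [hbw]
            rw [e3]; exact hlt

lemma altCounts_eq_counter (ps : List ((String × String) × Int)) :
    altCounts ps = PySem.Dict.counter (ps.map pvWin) := by
  unfold altCounts
  rw [← PySem.Dict.foldl_insert_getD_add_one_eq_counter, List.foldl_map]
  rfl

theorem main_aux (competitions : List (String × String)) (results : List Int)
    (hpre : competitions.length ≤ results.length) :
    competitionwonLoop results 0 "" (PySem.Dict.empty.insert "" 0) competitions =
      (if (altCounts (competitions.zip results)).items = [] then ""
       else altScan (3 * ((PySem.List.max? (altCounts (competitions.zip results)).values id).getD 0))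
         PySem.Dict.empty (competitions.zip results)) := by
  have hA : competitionwonLoop results 0 "" (PySem.Dict.empty.insert "" 0) competitions =
      loopZ "" (PySem.Dict.empty.insert "" 0) (competitions.zip results) := by
    have := loopA_eq_loopZ competitions [] results "" (PySem.Dict.empty.insert "" 0) hpre
    simpa using this
  rw [hA]
  rw [altCounts_eq_counter]
  cases hzip : competitions.zip results with
  | nil =>
    simp only [loopZ]
    rw [if_pos (by simp [PySem.Dict.counter]; rfl)]
  | cons p rest =>
    set ps := p :: rest with hps
    set ws := ps.map pvWin with hws
    have hwsne : ws ≠ [] := by simp [hws, hps]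
    have hkeys : (PySem.Dict.counter ws).keys = PySem.Set.ofList ws := PySem.Dict.keys_counter ws
    have hitemsne : (PySem.Dict.counter ws).items ≠ [] := by
      intro hit
      have : (PySem.Dict.counter ws).keys = [] := by simp [PySem.Dict.keys, hit]
      rw [hkeys] at this
      have : pvWin p ∈ PySem.Set.ofList ws := by
        rw [PySem.Set.mem_ofList]; simp [hws, hps]
      simp_all
    rw [if_neg hitemsne]
    have hvals : (PySem.Dict.counter ws).values = (PySem.Set.ofList ws).map (fun k => ((ws.count k : Nat) : Int)) := by
      have := PySem.Dict.items_counter ws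
      simp [PySem.Dict.values, this]
    have hvalsne : (PySem.Dict.counter ws).values ≠ [] := by
      rw [hvals]
      simp only [ne_eq, List.map_eq_nil_iff]
      intro h
      have : pvWin p ∈ PySem.Set.ofList ws := by
        rw [PySem.Set.mem_ofList]; simp [hws, hps]
      simp_all
    cases hmx : PySem.List.max? (PySem.Dict.counter ws).values id with
    | none => exact absurd ((PySem.List.max?_eq_none_iff _ _).mp hmx) hvalsne
    | some m =>
      have hmem : m ∈ (PySem.Dict.counter ws).values := PySem.List.max?_mem hmx
      have hmax : ∀ y ∈ (PySem.Dict.counter ws).values, id y ≤ id m := PySem.List.max?_isMax hmx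
      rw [hvals] at hmem
      obtain ⟨k, hk, hkm⟩ := List.mem_map.mp hmem
      have hkws : k ∈ ws := (PySem.Set.mem_ofList _ _).mp hk
      have hm0 : m = ((ws.count k : Nat) : Int) := hkm.symm
      have hkpos : 0 < ws.count k := List.count_pos_iff.mpr hkws
      have hMcast : ((m.toNat : Nat) : Int) = m := by rw [hm0]; simp
      have hMb : ∀ t, ws.count t ≤ m.toNat := by
        intro t
        by_cases ht : t ∈ ws
        · have : ((ws.count t : Nat) : Int) ∈ (PySem.Dict.counter ws).values := by
            rw [hvals]
            exact List.mem_map.mpr ⟨t, (PySem.Set.mem_ofList _ _).mpr ht, rfl⟩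
          have := hmax _ this
          simp only [id] at this
          omega
        · have : ws.count t = 0 := List.count_eq_zero.mpr ht
          omega
      have := loopZ_eq_altScan ps [] "" (PySem.Dict.empty.insert "" 0) PySem.Dict.empty m.toNat
        (by intro t; rw [PySem.Dict.getD_insert]; split_ifs <;> simp)
        (by intro t; simp)
        (by intro t; simp)
        (by simp; omega)
        (by intro t; simp only [List.nil_append, ← hws]; exact hMb t)
        (⟨k, by simp only [List.nil_append, ← hws]; omega⟩)
      rw [Option.getD_some, ← hMcast]
      exact this

theorem competitionwon_spec_aux (competitions : List (String × String)) (results : List Int)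
    (hpre : competitions.length ≤ results.length) :
    competitionwon competitions results = competitionwon_alt competitions results := by
  unfold competitionwon competitionwon_alt
  exact main_aux competitions results hpre

-- ===== VERDICT (by name: the statement is the Claim_ definition above) =====
theorem competitionwon_spec : Claim_equal_competitionwon := by
  intro comps res _ hpre
  exact competitionwon_spec_aux comps res hpre
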